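-- pv_equiv track=rewrite | github.com/angelatto/Algorithm | Python100/66.py | check
-- ===== SOURCE A (Python) =====
-- def check(block, rule):
--     temp = 0 # 항상 rule의 첫 인덱스로 초기화
--     for b in block:
--         if b in rule:
--             if temp > rule.index(b):
--                 return '불가능'
--             temp = rule.index(b)
--     return '가능'
-- ===== SOURCE B (Python) =====
-- def check(block, rule):
--     idx = [rule.index(b) for b in block if b in rule]
--     return '가능' if idx == sorted(idx) else '불가능'
-- ===== Notes on version B (the rewrite author's own statement) =====
-- stated objective: simpler
-- what changed: Replaces the early-terminating adjacent-pair scan with state variable by materialising the list of rule-indices once and comparing it with its sorted copy.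
import Mathlib
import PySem

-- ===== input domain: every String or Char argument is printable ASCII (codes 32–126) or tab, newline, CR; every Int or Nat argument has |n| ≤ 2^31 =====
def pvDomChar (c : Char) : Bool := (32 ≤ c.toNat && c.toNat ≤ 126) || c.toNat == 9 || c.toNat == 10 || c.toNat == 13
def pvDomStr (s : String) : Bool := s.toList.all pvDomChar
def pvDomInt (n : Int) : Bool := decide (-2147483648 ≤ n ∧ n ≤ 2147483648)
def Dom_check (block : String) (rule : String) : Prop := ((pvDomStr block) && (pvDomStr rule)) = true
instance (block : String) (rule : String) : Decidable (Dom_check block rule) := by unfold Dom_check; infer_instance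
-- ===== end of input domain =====

-- B builds the list of rule-indices once and compares it with its sorted copy,
-- instead of A's early-terminating scan over adjacent pairs with a state variable (objective: simpler).

-- ===== PORT A =====
-- 'b in rule' for the single character b is b ∈ rule.toList; 'rule.index(b)' is the
-- first index of b in rule.toList (guarded by the membership test, so it never raises).
def checkLoop (rule : String) : List Char → Int → String
  | [], _ => "가능"
  | b :: rest, temp =>
    if b ∈ rule.toList then
      if temp > (((PySem.List.index? rule.toList b).getD 0 : Nat) : Int) then "불가능"
      else checkLoop rule rest (((PySem.List.index? rule.toList b).getD 0 : Nat) : Int)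
    else checkLoop rule rest temp

def check (block : String) (rule : String) : String := checkLoop rule block.toList 0

-- ===== PORT B =====
def check_alt (block : String) (rule : String) : String :=
  let idx : List Int := (block.toList.filter (fun b => decide (b ∈ rule.toList))).map
      (fun b => (((PySem.List.index? rule.toList b).getD 0 : Nat) : Int))
  if idx = PySem.List.sorted idx (fun x => x) false then "가능" else "불가능"

-- ===== PRECONDITION & SPEC =====
def Spec_check (block : String) (rule : String) (out : String) : Prop := out = check_alt block rule
instance (block : String) (rule : String) (out : String) : Decidable (Spec_check block rule out) := by unfold Spec_check; infer_instance

-- ===== CLAIM (what is proved, stated in full; the proofs are below) =====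
def Claim_equal_check : Prop := ∀ (block : String) (rule : String), Dom_check block rule → Spec_check block rule (check block rule)

-- ===== LEMMAS AND PROOFS =====

def idxList (rule : String) (cs : List Char) : List Int :=
  (cs.filter (fun b => decide (b ∈ rule.toList))).map
    (fun b => (((PySem.List.index? rule.toList b).getD 0 : Nat) : Int))

theorem idxList_nonneg (rule : String) (cs : List Char) :
    ∀ x ∈ idxList rule cs, (0 : Int) ≤ x := by
  intro x hx
  simp only [idxList, List.mem_map] at hx
  obtain ⟨b, -, rfl⟩ := hx
  exact Int.natCast_nonneg _

theorem checkLoop_eq_chain (rule : String) (cs : List Char) :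
    ∀ temp : Int, checkLoop rule cs temp =
      if List.IsChain (· ≤ ·) (temp :: idxList rule cs) then "가능" else "불가능" := by
  induction cs with
  | nil => intro temp; simp [checkLoop, idxList]
  | cons b rest ih =>
    intro temp
    by_cases hb : b ∈ rule.toList
    · simp only [checkLoop, idxList, List.filter_cons, hb, decide_true, if_pos, List.map_cons]
      simp only [List.isChain_cons_cons]
      by_cases hgt : temp > (((PySem.List.index? rule.toList b).getD 0 : Nat) : Int)
      · rw [if_pos hgt, if_neg]
        rintro ⟨hle, -⟩; omega
      · rw [if_neg hgt, ih]
        have hle : temp ≤ (((PySem.List.index? rule.toList b).getD 0 : Nat) : Int) := by omega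
        simp only [idxList]
        exact (if_congr (and_iff_right hle) rfl rfl).symm
    · simp only [checkLoop, idxList, List.filter_cons, hb, decide_false, if_false]
      exact ih temp

theorem chain_cons_zero (l : List Int) (h : ∀ x ∈ l, (0 : Int) ≤ x) :
    List.IsChain (· ≤ ·) ((0 : Int) :: l) ↔ List.IsChain (· ≤ ·) l := by
  rw [List.isChain_cons]
  constructor
  · exact fun ⟨_, hc⟩ => hc
  · intro hc
    refine ⟨fun b hb => h b ?_, hc⟩
    cases l with
    | nil => simp at hb
    | cons y t => simp at hb; simp [hb]

theorem chain_iff_sorted (l : List Int) :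
    List.IsChain (· ≤ ·) l ↔ l = PySem.List.sorted l (fun x => x) false := by
  rw [List.isChain_iff_pairwise]
  constructor
  · intro hp
    exact (PySem.List.sorted_eq_self_of_pairwise l (fun x => x) hp).symm
  · intro he
    have := PySem.List.sorted_pairwise l (fun x => x) (κ := Int)
    rw [← he] at this
    exact this

-- ===== VERDICT (by name: the statement is the Claim_ definition above) =====
theorem check_spec : Claim_equal_check := by
  intro block rule _
  unfold Spec_check check check_alt
  rw [checkLoop_eq_chain]
  have h0 := chain_cons_zero (idxList rule block.toList) (idxList_nonneg rule block.toList)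
  have h1 := chain_iff_sorted (idxList rule block.toList)
  show (if List.IsChain (· ≤ ·) ((0 : Int) :: idxList rule block.toList) then "가능" else "불가능") =
    (if idxList rule block.toList =
        PySem.List.sorted (idxList rule block.toList) (fun x => x) false then "가능" else "불가능")
  rw [if_congr (h0.trans h1) rfl rfl]
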